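-- pv_equiv track=rewrite | github.com/hex0d/CDados | CD Final - Final/Decode.py | to_MLT
-- ===== SOURCE A (Python) =====
-- def to_MLT(array_msg): #transform from binary list to MLT-3 array
--     i=0
--     MLT_check = [0,1,0,-1]
--     MLT_array = []
--     for x in array_msg:
--         if x == 0:
--             MLT_array.append(MLT_check[i%4])
--         if x == 1:
--             i += 1
--             MLT_array.append(MLT_check[i%4])
--     return MLT_array
-- ===== SOURCE B (Python) =====
-- def to_MLT(array_msg):
--     # run-length construction: jump between positions of 1s, emitting constant runs
--     MLT_check = [0, 1, 0, -1]
--     bits = [x for x in array_msg if x == 0 or x == 1]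
--     ones = [j for j, x in enumerate(bits) if x == 1]
--     out = []
--     prev = 0
--     for k, j in enumerate(ones):
--         out += [MLT_check[k % 4]] * (j - prev)
--         out.append(MLT_check[(k + 1) % 4])
--         prev = j + 1
--     out += [MLT_check[len(ones) % 4]] * (len(bits) - prev)
--     return out
-- ===== Notes on version B (the rewrite author's own statement) =====
-- stated objective: alternative
-- what changed: Replaces A's per-element state-machine loop by a run-length construction: it collects the positions of the 1-bits (in the 0/1-filtered input) and loops over those positions, emitting each constant run of the signal at once with list multiplication plus the transition sample, then the trailing run.
import Mathlib
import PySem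

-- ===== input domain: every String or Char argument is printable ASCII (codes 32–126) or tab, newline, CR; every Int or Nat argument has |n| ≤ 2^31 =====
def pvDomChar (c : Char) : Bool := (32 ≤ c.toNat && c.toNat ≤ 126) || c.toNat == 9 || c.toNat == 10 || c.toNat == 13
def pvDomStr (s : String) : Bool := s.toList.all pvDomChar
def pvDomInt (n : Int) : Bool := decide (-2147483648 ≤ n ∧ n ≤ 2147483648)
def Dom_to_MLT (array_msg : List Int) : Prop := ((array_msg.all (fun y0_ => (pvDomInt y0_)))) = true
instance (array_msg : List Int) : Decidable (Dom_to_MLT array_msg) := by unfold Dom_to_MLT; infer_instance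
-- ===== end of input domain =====

-- B replaces A's per-element state machine by a run-length construction: it jumps between the
-- positions of the 1-bits and emits each constant run of the signal at once (alternative decomposition).

-- ===== PORT A =====
-- A's loop state: (i, MLT_array); MLT_check[i%4] ported via PySem.List.pyGet? (i ≥ 0 so always in range).
def to_MLT (array_msg : List Int) : List Int :=
  let MLT_check : List Int := [0, 1, 0, -1]
  (array_msg.foldl
    (fun (st : Int × List Int) x =>
      let st := if x == 0 then (st.1, st.2 ++ [(PySem.List.pyGet? MLT_check (st.1 % 4)).getD 0]) else st
      if x == 1 then (st.1 + 1, st.2 ++ [(PySem.List.pyGet? MLT_check ((st.1 + 1) % 4)).getD 0]) else st)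
    (0, [])).2

-- ===== PORT B =====
-- filter → positions of 1-bits (enumerate) → loop over those positions emitting runs ([v]*(j-prev) = pyRepeat).
def to_MLT_alt (array_msg : List Int) : List Int :=
  let MLT_check : List Int := [0, 1, 0, -1]
  let bits := array_msg.filter (fun x => x == 0 || x == 1)
  let ones := ((PySem.List.enumerate bits).filter (fun p => p.2 == 1)).map Prod.fst
  let st := (PySem.List.enumerate ones).foldl
    (fun (st : List Int × Int) kj =>
      (st.1 ++ PySem.List.pyRepeat [(PySem.List.pyGet? MLT_check (kj.1 % 4)).getD 0] (kj.2 - st.2)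
            ++ [(PySem.List.pyGet? MLT_check ((kj.1 + 1) % 4)).getD 0],
       kj.2 + 1))
    ([], 0)
  st.1 ++ PySem.List.pyRepeat [(PySem.List.pyGet? MLT_check ((ones.length : Int) % 4)).getD 0]
            ((bits.length : Int) - st.2)

-- ===== PRECONDITION & SPEC =====
def Spec_to_MLT (array_msg : List Int) (out : List Int) : Prop := out = to_MLT_alt array_msg
instance (array_msg : List Int) (out : List Int) : Decidable (Spec_to_MLT array_msg out) := by unfold Spec_to_MLT; infer_instance

-- ===== CLAIM (what is proved, stated in full; the proofs are below) =====
def Claim_equal_to_MLT : Prop := ∀ (array_msg : List Int), Dom_to_MLT array_msg → Spec_to_MLT array_msg (to_MLT array_msg)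

-- ===== LEMMAS AND PROOFS =====

def pvMlt (c : Int) : Int := (PySem.List.pyGet? ([0, 1, 0, -1] : List Int) (c % 4)).getD 0

-- canonical recursion both sides are reduced to
def pvSig (i : Int) : List Int → List Int
  | [] => []
  | x :: xs =>
    if x = 0 then pvMlt i :: pvSig i xs
    else if x = 1 then pvMlt (i + 1) :: pvSig (i + 1) xs
    else pvSig i xs

def pvStepA (st : Int × List Int) (x : Int) : Int × List Int :=
  let st := if x == 0 then (st.1, st.2 ++ [pvMlt st.1]) else st
  if x == 1 then (st.1 + 1, st.2 ++ [pvMlt (st.1 + 1)]) else st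

theorem foldA_eq (l : List Int) : ∀ (i : Int) (acc : List Int),
    (l.foldl pvStepA (i, acc)).2 = acc ++ pvSig i l := by
  induction l with
  | nil => intro i acc; simp [pvSig]
  | cons x xs ih =>
    intro i acc
    by_cases h0 : x = 0
    · subst h0; simp [List.foldl, pvStepA, pvSig, ih]
    · by_cases h1 : x = 1
      · subst h1; simp [List.foldl, pvStepA, pvSig, ih]
      · simp [List.foldl, pvStepA, pvSig, h0, h1, ih]

theorem pvSig_filter : ∀ (l : List Int) (i : Int),
    pvSig i (l.filter (fun x => x == 0 || x == 1)) = pvSig i l := by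
  intro l
  induction l with
  | nil => intro i; rfl
  | cons x xs ih =>
    intro i
    by_cases h0 : x = 0
    · subst h0; simp [pvSig, ih]
    · by_cases h1 : x = 1
      · subst h1; simp [pvSig, ih]
      · simp [pvSig, h0, h1, ih]

-- B-side abstractions
def pvOnes (off : Int) : List Int → List Int :=
  fun bits => ((PySem.List.enumerate bits off).filter (fun p => p.2 == 1)).map Prod.fst

def pvStepB (st : List Int × Int) (kj : Int × Int) : List Int × Int :=
  (st.1 ++ PySem.List.pyRepeat [pvMlt kj.1] (kj.2 - st.2) ++ [pvMlt (kj.1 + 1)], kj.2 + 1)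

def pvC1 (bits : List Int) : Int := ((bits.filter (fun x => x == 1)).length : Int)

theorem pvOnes_cons (off x : Int) (bits : List Int) :
    pvOnes off (x :: bits) =
      if x = 1 then off :: pvOnes (off + 1) bits else pvOnes (off + 1) bits := by
  by_cases h : x = 1 <;> simp [pvOnes, PySem.List.enumerate_cons, h]

theorem pvOnes_length (off : Int) (bits : List Int) :
    ((pvOnes off bits).length : Int) = pvC1 bits := by
  induction bits generalizing off with
  | nil => simp [pvOnes, pvC1]
  | cons x xs ih =>
    by_cases h : x = 1
    · rw [pvOnes_cons, if_pos h, List.length_cons]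
      have hc : pvC1 (x :: xs) = pvC1 xs + 1 := by simp [pvC1, h]
      rw [hc, ← ih (off + 1)]; push_cast; ring
    · rw [pvOnes_cons, if_neg h]
      have hc : pvC1 (x :: xs) = pvC1 xs := by simp [pvC1, h]
      rw [hc, ← ih (off + 1)]

theorem pvOnes_ge (off : Int) (bits : List Int) : ∀ p ∈ pvOnes off bits, off ≤ p := by
  induction bits generalizing off with
  | nil => simp [pvOnes]
  | cons x xs ih =>
    intro p hp
    by_cases h : x = 1
    · rw [pvOnes_cons, if_pos h] at hp
      rcases List.mem_cons.mp hp with hp | hp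
      · omega
      · have := ih (off + 1) p hp; omega
    · rw [pvOnes_cons, if_neg h] at hp
      have := ih (off + 1) p hp; omega

theorem pyRepeat_succ (a : Int) (n : Int) (h : 1 ≤ n) :
    PySem.List.pyRepeat [a] n = a :: PySem.List.pyRepeat [a] (n - 1) := by
  rw [PySem.List.pyRepeat_singleton, PySem.List.pyRepeat_singleton]
  have : n.toNat = (n - 1).toNat + 1 := by omega
  rw [this, List.replicate_succ]

-- no-ones lists are all zeros: pvSig emits a constant run
theorem pvSig_no_ones (bits : List Int) (h01 : ∀ x ∈ bits, x = 0 ∨ x = 1)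
    (h : pvC1 bits = 0) (k : Int) :
    pvSig k bits = PySem.List.pyRepeat [pvMlt k] (bits.length : Int) := by
  induction bits with
  | nil => simp [pvSig, PySem.List.pyRepeat_singleton]
  | cons x xs ih =>
    have hx := h01 x (by simp)
    rcases hx with h0 | h1
    · subst h0
      have hxs : pvC1 xs = 0 := by simpa [pvC1] using h
      rw [pvSig, if_pos rfl, ih (fun y hy => h01 y (by simp [hy])) hxs]
      simp [PySem.List.pyRepeat_singleton, List.replicate_succ]
    · exfalso; subst h1; simp [pvC1] at h; omega

theorem foldB_main (bits : List Int) (h01 : ∀ x ∈ bits, x = 0 ∨ x = 1) :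
    ∀ (k off : Int) (acc : List Int),
    (((PySem.List.enumerate (pvOnes off bits) k).foldl pvStepB (acc, off)).1
      ++ PySem.List.pyRepeat [pvMlt (k + pvC1 bits)]
           ((off + (bits.length : Int)) - ((PySem.List.enumerate (pvOnes off bits) k).foldl pvStepB (acc, off)).2))
      = acc ++ pvSig k bits := by
  induction bits with
  | nil =>
    intro k off acc
    simp [pvOnes, pvSig, pvC1, PySem.List.pyRepeat_singleton]
  | cons x xs ih =>
    intro k off acc
    have hxs : ∀ y ∈ xs, y = 0 ∨ y = 1 := fun y hy => h01 y (by simp [hy])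
    rcases h01 x (by simp) with h0 | h1
    · -- leading zero
      subst h0
      rw [pvOnes_cons, if_neg (by norm_num)]
      cases hON : pvOnes (off + 1) xs with
      | nil =>
        -- no ones at all
        have hc1 : pvC1 xs = 0 := by
          have := pvOnes_length (off + 1) xs
          rw [hON] at this; simpa [pvC1] using this.symm
        have hc0 : pvC1 (0 :: xs) = pvC1 xs := by simp [pvC1]
        simp only [PySem.List.enumerate_nil, List.foldl_nil]
        rw [pvSig, if_pos rfl, pvSig_no_ones xs hxs hc1 k, hc0, hc1, add_zero]
        have harg : off + (((0 : Int) :: xs).length : Int) - off = (xs.length : Int) + 1 := by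
          simp only [List.length_cons]; push_cast; ring
        rw [harg, pyRepeat_succ _ _ (by omega), add_sub_cancel_right]
      | cons j rest =>
        have hj : off + 1 ≤ j := pvOnes_ge (off + 1) xs j (by rw [hON]; simp)
        -- first step from prev=off equals first step from prev=off+1 with mlt k already emitted
        have hstep : pvStepB (acc, off) (k, j) = pvStepB (acc ++ [pvMlt k], off + 1) (k, j) := by
          unfold pvStepB
          simp only
          rw [pyRepeat_succ (pvMlt k) (j - off) (by omega)]
          have h2 : j - off - 1 = j - (off + 1) := by ring
          rw [h2]
          simp
        rw [PySem.List.enumerate_cons, List.foldl_cons, hstep, ← List.foldl_cons,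
            ← PySem.List.enumerate_cons, ← hON]
        have hthis := ih hxs k (off + 1) (acc ++ [pvMlt k])
        have hc : pvC1 ((0 : Int) :: xs) = pvC1 xs := by simp [pvC1]
        have hlen : off + ((((0 : Int) :: xs).length : Int)) = (off + 1) + (xs.length : Int) := by
          simp only [List.length_cons]; push_cast; ring
        rw [pvSig, if_pos rfl, hc, hlen, hthis]
        simp
    · -- leading one
      subst h1
      rw [pvOnes_cons, if_pos rfl, PySem.List.enumerate_cons, List.foldl_cons]
      have hstep : pvStepB (acc, off) (k, off) = (acc ++ [pvMlt (k + 1)], off + 1) := by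
        unfold pvStepB
        simp [PySem.List.pyRepeat_singleton]
      rw [hstep]
      have hthis := ih hxs (k + 1) (off + 1) (acc ++ [pvMlt (k + 1)])
      have hk : k + pvC1 ((1 : Int) :: xs) = (k + 1) + pvC1 xs := by
        have : pvC1 ((1 : Int) :: xs) = pvC1 xs + 1 := by simp [pvC1]
        rw [this]; ring
      have hlen : off + ((((1 : Int) :: xs).length : Int)) = (off + 1) + (xs.length : Int) := by
        simp only [List.length_cons]; push_cast; ring
      rw [pvSig, if_neg (by norm_num), if_pos rfl, hk, hlen, hthis]
      simp

theorem bits_mem (l : List Int) :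
    ∀ x ∈ l.filter (fun x => x == 0 || x == 1), x = 0 ∨ x = 1 := by
  intro x hx
  have := List.of_mem_filter hx
  simpa using this

-- ===== VERDICT (by name: the statement is the Claim_ definition above) =====
theorem to_MLT_spec : Claim_equal_to_MLT := by
  intro l _
  show to_MLT l = to_MLT_alt l
  have hA : to_MLT l = (List.foldl pvStepA (0, []) l).2 := rfl
  rw [hA, foldA_eq l 0 []]
  have hB : to_MLT_alt l =
      (((PySem.List.enumerate (pvOnes 0 (l.filter (fun x => x == 0 || x == 1))) 0).foldl pvStepB ([], 0)).1
        ++ PySem.List.pyRepeat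
             [pvMlt ((pvOnes 0 (l.filter (fun x => x == 0 || x == 1))).length : Int)]
             (((l.filter (fun x => x == 0 || x == 1)).length : Int)
               - ((PySem.List.enumerate (pvOnes 0 (l.filter (fun x => x == 0 || x == 1))) 0).foldl pvStepB ([], 0)).2)) := rfl
  rw [hB]
  have hmain := foldB_main (l.filter (fun x => x == 0 || x == 1)) (bits_mem l) 0 0 []
  rw [zero_add, zero_add] at hmain
  rw [pvOnes_length]
  rw [hmain, List.nil_append, pvSig_filter]
  simp
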